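-- pv_equiv track=rewrite | github.com/GedSid/SDI | src/scram/model/nrz_2_nrzi_model.py | nrz_2_nrzi_bit
-- ===== SOURCE A (Python) =====
-- def nrz_2_nrzi_bit(input_bits):
--   """Converts an NRZ signal to an NRZI signal.
--   Args: input_bits: A list of bits representing the NRZ signal.
--   Returns: A list of bits representing the NRZI signal.
--   """
--
--   nrzi_signal = []
--   current_state = 0
--
--   for bit in input_bits:
--     if bit == 1:
--         current_state = 1 - current_state
--     nrzi_signal.append(current_state)
--
--   return nrzi_signal
-- ===== SOURCE B (Python) =====
-- def nrz_2_nrzi_bit(input_bits):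
--     # Run-length construction: locate the positions of 1-bits (the toggle points),
--     # then emit constant blocks between consecutive toggle points.
--     n = len(input_bits)
--     ones_pos = [i for i, b in enumerate(input_bits) if b == 1]
--     out = []
--     state = 0
--     prev = 0
--     for p in ones_pos:
--         out.extend([state] * (p - prev))
--         state = 1 - state
--         prev = p
--     out.extend([state] * (n - prev))
--     return out
-- ===== Notes on version B (the rewrite author's own statement) =====
-- stated objective: alternative
-- what changed: Instead of a per-bit pass with a toggled state, B first collects the indices of 1-bits and then builds the output as constant runs between consecutive toggle positions (run-length construction).
import Mathlib
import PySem

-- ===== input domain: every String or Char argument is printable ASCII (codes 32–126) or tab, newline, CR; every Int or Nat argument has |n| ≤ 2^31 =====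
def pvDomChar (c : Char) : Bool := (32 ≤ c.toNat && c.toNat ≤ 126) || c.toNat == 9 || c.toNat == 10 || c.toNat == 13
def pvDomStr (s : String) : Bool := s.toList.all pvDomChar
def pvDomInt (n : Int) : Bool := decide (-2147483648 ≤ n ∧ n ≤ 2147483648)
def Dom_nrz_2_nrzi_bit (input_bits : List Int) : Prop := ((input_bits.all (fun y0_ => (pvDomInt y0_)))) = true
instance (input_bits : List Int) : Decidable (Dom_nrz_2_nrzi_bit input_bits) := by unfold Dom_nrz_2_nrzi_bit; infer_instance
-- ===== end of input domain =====

-- B replaces A's per-bit toggled-state pass by a run-length construction: collect the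
-- indices of 1-bits, then emit constant blocks between consecutive toggle positions.

-- ===== PORT A =====
-- A: one loop toggling current_state on bit == 1, appending the state each step.
def nrz_2_nrzi_bit (input_bits : List Int) : List Int :=
  (input_bits.foldl
    (fun (st : List Int × Int) bit =>
      let current_state := if bit = 1 then 1 - st.2 else st.2
      (st.1 ++ [current_state], current_state))
    ([], 0)).1

-- ===== PORT B =====
-- B helper: the loop over ones_pos with state (state, prev), emitting one constant
-- block per toggle position, plus the final tail block (Source B's last extend).
def nrzBlocks (state : Int) (prev : Nat) (n : Nat) : List Nat → List Int
  | [] => List.replicate (n - prev) state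
  | p :: rest => List.replicate (p - prev) state ++ nrzBlocks (1 - state) p n rest

def nrz_2_nrzi_bit_alt (input_bits : List Int) : List Int :=
  let n := input_bits.length
  let ones_pos := ((input_bits.zipIdx).filter (fun x => x.1 = 1)).map (·.2)
  nrzBlocks 0 0 n ones_pos

-- ===== PRECONDITION & SPEC =====
def Spec_nrz_2_nrzi_bit (input_bits : List Int) (out : List Int) : Prop := out = nrz_2_nrzi_bit_alt input_bits
instance (input_bits : List Int) (out : List Int) : Decidable (Spec_nrz_2_nrzi_bit input_bits out) := by unfold Spec_nrz_2_nrzi_bit; infer_instance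

-- ===== CLAIM (what is proved, stated in full; the proofs are below) =====
def Claim_equal_nrz_2_nrzi_bit : Prop := ∀ (input_bits : List Int), Dom_nrz_2_nrzi_bit input_bits → Spec_nrz_2_nrzi_bit input_bits (nrz_2_nrzi_bit input_bits)

-- ===== LEMMAS AND PROOFS =====

-- A's loop as a structural recursion (state only; the growing list is the output).
def nrzA (s : Int) : List Int → List Int
  | [] => []
  | b :: rest =>
    let s' := if b = 1 then 1 - s else s
    s' :: nrzA s' rest

theorem nrz_fold_eq_nrzA (l : List Int) (acc : List Int) (s : Int) :
    (l.foldl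
      (fun (st : List Int × Int) bit =>
        let current_state := if bit = 1 then 1 - st.2 else st.2
        (st.1 ++ [current_state], current_state))
      (acc, s)).1 = acc ++ nrzA s l := by
  induction l generalizing acc s with
  | nil => simp [nrzA]
  | cons b rest ih => simp [nrzA, ih, List.append_assoc]

-- One output position shifts off the front of a block decomposition whose
-- boundaries all lie strictly beyond the current position.
theorem nrzBlocks_shift (s : Int) (i n : Nat) (ps : List Nat)
    (hps : ∀ p ∈ ps, i + 1 ≤ p) (hn : i + 1 ≤ n) :
    nrzBlocks s i n ps = s :: nrzBlocks s (i + 1) n ps := by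
  cases ps with
  | nil =>
    simp only [nrzBlocks]
    rw [show n - i = (n - (i+1)) + 1 by omega]
    simp [List.replicate_succ]
  | cons p rest =>
    have hp := hps p (by simp)
    simp only [nrzBlocks]
    rw [show p - i = (p - (i+1)) + 1 by omega]
    simp [List.replicate_succ]

-- Core correspondence between A's recursion and B's block construction,
-- generalized over the starting index of zipIdx.
theorem nrzA_eq_blocks (l : List Int) (s : Int) (i : Nat) :
    nrzA s l = nrzBlocks s i (i + l.length)
      (((l.zipIdx i).filter (fun x => x.1 = 1)).map (·.2)) := by
  induction l generalizing s i with
  | nil => simp [nrzA, nrzBlocks]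
  | cons b rest ih =>
    have hmem : ∀ p ∈ (((rest.zipIdx (i+1)).filter (fun x => x.1 = 1)).map (·.2)),
        i + 1 ≤ p := by
      intro p hp
      simp only [List.mem_map, List.mem_filter] at hp
      obtain ⟨⟨x, j⟩, ⟨hx, _⟩, rfl⟩ := hp
      exact (List.mem_zipIdx hx).1
    have hlen : i + (b :: rest).length = (i + 1) + rest.length := by
      simp; omega
    rw [hlen]
    by_cases hb : b = 1
    · simp only [nrzA, List.zipIdx_cons, List.filter_cons, hb, decide_true,
        if_pos, List.map_cons]
      simp only [nrzBlocks, Nat.sub_self, List.replicate_zero, List.nil_append]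
      rw [nrzBlocks_shift _ _ _ _ hmem (by omega), ih (1 - s) (i + 1)]
    · simp only [nrzA, List.zipIdx_cons, List.filter_cons, hb, decide_false,
        if_false, Bool.false_eq_true]
      rw [nrzBlocks_shift _ _ _ _ hmem (by omega), ih s (i + 1)]

-- ===== VERDICT (by name: the statement is the Claim_ definition above) =====
theorem nrz_2_nrzi_bit_spec : Claim_equal_nrz_2_nrzi_bit := by
  intro l _
  show _ = _
  unfold nrz_2_nrzi_bit nrz_2_nrzi_bit_alt
  rw [nrz_fold_eq_nrzA l [] 0, List.nil_append, nrzA_eq_blocks l 0 0, Nat.zero_add]
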